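-- pv_equiv track=rewrite | github.com/basiralab/RepFL | utils/utils.py | generate_fold_configurations
-- ===== SOURCE A (Python) =====
-- def generate_fold_configurations(n):
--     fold_configs = []
--     one_config = [i for i in range(n)]
--     fold_configs.append(one_config)
--
--     for i in range(n - 1):
--         one_config = one_config[1:] + [one_config[0]]
--         fold_configs.append(one_config)
--
--     return fold_configs
-- ===== SOURCE B (Python) =====
-- def generate_fold_configurations(n):
--     base = list(range(n))
--     return [base] + [base[i:] + base[:i] for i in range(1, n)]
-- ===== Notes on version B (the rewrite author's own statement) =====
-- stated objective: alternative
-- what changed: Each rotation row is computed independently from the base list by slicing at offset i (base[i:] + base[:i]) instead of being derived incrementally by rotating the previous row one step at a time.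
import Mathlib
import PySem

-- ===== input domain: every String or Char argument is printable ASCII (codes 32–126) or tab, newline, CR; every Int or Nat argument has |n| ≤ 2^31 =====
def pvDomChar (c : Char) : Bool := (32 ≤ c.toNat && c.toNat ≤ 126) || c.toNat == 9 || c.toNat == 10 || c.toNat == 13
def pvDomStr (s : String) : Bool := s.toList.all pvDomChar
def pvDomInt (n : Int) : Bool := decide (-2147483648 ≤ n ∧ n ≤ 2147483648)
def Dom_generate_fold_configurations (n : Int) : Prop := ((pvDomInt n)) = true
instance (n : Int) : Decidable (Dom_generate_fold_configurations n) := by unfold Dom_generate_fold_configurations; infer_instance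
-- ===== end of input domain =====

-- B computes every rotation row independently by slicing the base list at offset i
-- instead of incrementally rotating the previous row (alternative decomposition).


-- ===== PORT A =====
-- one_config[0] is ported with .getD 0; it is exact because the loop only runs when
-- n ≥ 2, so one_config (a rotation of range(n)) is nonempty on every iteration.
def generate_fold_configurations (n : Int) : List (List Int) :=
  let one_config : List Int := PySem.List.pyRange 0 n 1
  let fold_configs : List (List Int) := [one_config]
  let st := (PySem.List.pyRange 0 (n - 1) 1).foldl
    (fun (st : List (List Int) × List Int) _ =>
      let one := PySem.List.slice st.2 (some 1) none ++ [(PySem.List.pyGet? st.2 0).getD 0]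
      (st.1 ++ [one], one))
    (fold_configs, one_config)
  st.1

-- ===== PORT B =====
def generate_fold_configurations_alt (n : Int) : List (List Int) :=
  let base : List Int := PySem.List.pyRange 0 n 1
  [base] ++ (PySem.List.pyRange 1 n 1).map (fun i =>
    PySem.List.slice base (some i) none ++ PySem.List.slice base none (some i))

-- ===== PRECONDITION & SPEC =====
def Spec_generate_fold_configurations (n : Int) (out : List (List Int)) : Prop := out = generate_fold_configurations_alt n
instance (n : Int) (out : List (List Int)) : Decidable (Spec_generate_fold_configurations n out) := by unfold Spec_generate_fold_configurations; infer_instance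

-- ===== CLAIM (what is proved, stated in full; the proofs are below) =====
def Claim_equal_generate_fold_configurations : Prop := ∀ (n : Int), Dom_generate_fold_configurations n → Spec_generate_fold_configurations n (generate_fold_configurations n)

-- ===== LEMMAS AND PROOFS =====

-- A's loop step on a nonempty list is List.rotate by 1.
theorem pv_step_eq_rotate (l : List Int) (hl : l ≠ []) :
    PySem.List.slice l (some 1) none ++ [(PySem.List.pyGet? l 0).getD 0] = l.rotate 1 := by
  cases l with
  | nil => exact absurd rfl hl
  | cons x xs =>
    simp [PySem.List.slice_from_one, List.rotate_cons_succ]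

-- Closed form of A's fold: it appends the successive rotations of the carried row.
theorem pv_foldl_rot (r : List Int) (l : List Int) (hl : l ≠ []) (acc : List (List Int)) :
    r.foldl
      (fun (st : List (List Int) × List Int) _ =>
        let one := PySem.List.slice st.2 (some 1) none ++ [(PySem.List.pyGet? st.2 0).getD 0]
        (st.1 ++ [one], one))
      (acc, l)
    = (acc ++ (List.range r.length).map (fun t => l.rotate (t + 1)), l.rotate r.length) := by
  induction r generalizing acc l with
  | nil => simp
  | cons a r ih =>
    simp only [List.foldl_cons]
    rw [pv_step_eq_rotate l hl]
    rw [ih (l.rotate 1) (by simpa using hl) (acc ++ [l.rotate 1])]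
    simp only [Prod.mk.injEq]
    refine ⟨?_, ?_⟩
    · rw [List.append_assoc]
      congr 1
      rw [List.length_cons, List.range_succ_eq_map]
      simp [List.rotate_rotate, Nat.add_comm, Nat.add_left_comm, Function.comp]
    · simp [List.rotate_rotate, Nat.add_comm]

-- A rotation of range(n) is the closed-form sliced row base[m:] ++ base[:m].
theorem pv_rotate_eq_row (n : Int) (m : Nat) (hm : (m : Int) ≤ n) :
    (PySem.List.pyRange 0 n 1).rotate m
      = PySem.List.slice (PySem.List.pyRange 0 n 1) (some (m : Int)) none
        ++ PySem.List.slice (PySem.List.pyRange 0 n 1) none (some (m : Int)) := by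
  rw [PySem.List.slice_from_natCast, PySem.List.slice_to_natCast]
  refine List.rotate_eq_drop_append_take ?_
  rw [PySem.List.length_pyRange_one]
  omega

theorem generate_fold_configurations_eq (n : Int) :
    generate_fold_configurations n = generate_fold_configurations_alt n := by
  have hA : generate_fold_configurations n
      = ((PySem.List.pyRange 0 (n - 1) 1).foldl
          (fun (st : List (List Int) × List Int) _ =>
            let one := PySem.List.slice st.2 (some 1) none ++ [(PySem.List.pyGet? st.2 0).getD 0]
            (st.1 ++ [one], one))
          ([PySem.List.pyRange 0 n 1], PySem.List.pyRange 0 n 1)).1 := rfl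
  have hB : generate_fold_configurations_alt n
      = [PySem.List.pyRange 0 n 1] ++ (PySem.List.pyRange 1 n 1).map (fun i =>
          PySem.List.slice (PySem.List.pyRange 0 n 1) (some i) none
            ++ PySem.List.slice (PySem.List.pyRange 0 n 1) none (some i)) := rfl
  rw [hA, hB]
  by_cases hn : n ≤ 1
  · rw [PySem.List.pyRange_one_eq_nil (a := 0) (b := n - 1) (by omega),
        PySem.List.pyRange_one_eq_nil (a := 1) (b := n) hn]
    simp
  · push Not at hn
    have hbase : PySem.List.pyRange 0 n 1 ≠ [] := by
      have := PySem.List.length_pyRange_one (a := 0) (b := n)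
      intro h
      rw [h] at this
      simp at this
      omega
    rw [pv_foldl_rot _ _ hbase]
    simp only [List.cons_append, List.nil_append]
    congr 1
    rw [PySem.List.length_pyRange_one, PySem.List.pyRange_one (a := 1) (b := n)]
    rw [List.map_map]
    have h0 : n - 1 - 0 = n - 1 := by ring
    rw [h0]
    apply List.map_congr_left
    intro t ht
    rw [List.mem_range] at ht
    have h1 : (1 : Int) + (t : Int) = ((t + 1 : Nat) : Int) := by push_cast; ring
    rw [Function.comp_apply, h1]
    exact pv_rotate_eq_row n (t + 1) (by omega)

-- ===== VERDICT (by name: the statement is the Claim_ definition above) =====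
theorem generate_fold_configurations_spec : Claim_equal_generate_fold_configurations := by
  intro n _
  unfold Spec_generate_fold_configurations
  exact generate_fold_configurations_eq n
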